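-- pv_equiv track=rewrite | github.com/ahmadseloabadi/sentiment-analysis-review-app-google-play | myModule/dataPreparation/preprocessing.py | handle_negation
-- ===== SOURCE A (Python) =====
-- def handle_negation(kalimat_baru):
--     negation_words = ["tidak", "bukan", "tak", "tiada", "jangan", "gak",'ga']
--     new_words = []
--     prev_word_is_negation = False
--     for word in kalimat_baru:
--         if word in negation_words:
--             new_words.append("tidak_")
--             prev_word_is_negation = True
--         elif prev_word_is_negation:
--             new_words[-1] += word
--             prev_word_is_negation = False
--         else:
--             new_words.append(word)
--     return new_words
-- ===== SOURCE B (Python) =====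
-- def handle_negation(kalimat_baru):
--     negation_words = ["tidak", "bukan", "tak", "tiada", "jangan", "gak", 'ga']
--     result = []
--     i = 0
--     n = len(kalimat_baru)
--     while i < n:
--         w = kalimat_baru[i]
--         if w in negation_words:
--             if i + 1 < n and kalimat_baru[i + 1] not in negation_words:
--                 result.append("tidak_" + kalimat_baru[i + 1])
--                 i += 2
--             else:
--                 result.append("tidak_")
--                 i += 1
--         else:
--             result.append(w)
--             i += 1
--     return result
-- ===== Notes on version B (the rewrite author's own statement) =====
-- stated objective: alternative
-- what changed: Replaces the carried prev_word_is_negation flag and in-place mutation of new_words[-1] by an index-based while loop that builds each merged token up-front, consuming two words per merge step.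
import Mathlib
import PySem

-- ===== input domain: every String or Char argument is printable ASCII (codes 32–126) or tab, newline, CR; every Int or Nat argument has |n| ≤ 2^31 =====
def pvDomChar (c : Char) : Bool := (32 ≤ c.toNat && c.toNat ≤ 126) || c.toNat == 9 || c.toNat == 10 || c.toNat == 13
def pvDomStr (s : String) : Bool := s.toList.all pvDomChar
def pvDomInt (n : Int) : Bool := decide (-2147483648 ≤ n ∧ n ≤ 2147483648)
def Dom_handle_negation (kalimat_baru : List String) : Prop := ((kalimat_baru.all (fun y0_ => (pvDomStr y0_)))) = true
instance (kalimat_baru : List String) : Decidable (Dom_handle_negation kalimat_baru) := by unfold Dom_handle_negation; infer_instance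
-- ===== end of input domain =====

-- B replaces the carried negation flag and mutation of new_words[-1] by an index-based scan that emits each merged token up-front (alternative decomposition, same O(n) cost).


-- ===== PORT A =====
def pvIsNeg (w : String) : Bool :=
  w ∈ ["tidak", "bukan", "tak", "tiada", "jangan", "gak", "ga"]

-- new_words[-1] += word  (list is nonempty whenever A reaches this branch)
def pvAppendLast : List String → String → List String
  | [], _ => []
  | [x], w => [x ++ w]
  | x :: y :: r, w => x :: pvAppendLast (y :: r) w

def pvAStep (s : List String × Bool) (word : String) : List String × Bool :=
  if pvIsNeg word then (s.1 ++ ["tidak_"], true)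
  else if s.2 then (pvAppendLast s.1 word, false)
  else (s.1 ++ [word], false)

def handle_negation (kalimat_baru : List String) : List String :=
  (kalimat_baru.foldl pvAStep ([], false)).1


-- ===== PORT B =====
def pvBGo : List String → List String
  | [] => []
  | [w] => if pvIsNeg w then ["tidak_"] else [w]
  | w :: w2 :: rest2 =>
    if pvIsNeg w then
      if ¬ pvIsNeg w2 then ("tidak_" ++ w2) :: pvBGo rest2
      else "tidak_" :: pvBGo (w2 :: rest2)
    else w :: pvBGo (w2 :: rest2)

def handle_negation_alt (kalimat_baru : List String) : List String :=
  pvBGo kalimat_baru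


-- ===== PRECONDITION & SPEC =====
def Spec_handle_negation (kalimat_baru : List String) (out : List String) : Prop := out = handle_negation_alt kalimat_baru
instance (kalimat_baru : List String) (out : List String) : Decidable (Spec_handle_negation kalimat_baru out) := by unfold Spec_handle_negation; infer_instance

-- ===== CLAIM (what is proved, stated in full; the proofs are below) =====
def Claim_equal_handle_negation : Prop := ∀ (kalimat_baru : List String), Dom_handle_negation kalimat_baru → Spec_handle_negation kalimat_baru (handle_negation kalimat_baru)

-- ===== LEMMAS AND PROOFS =====


theorem pvAppendLast_snoc (acc : List String) (x w : String) :
    pvAppendLast (acc ++ [x]) w = acc ++ [x ++ w] := by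
  induction acc with
  | nil => rfl
  | cons a t ih =>
    cases t with
    | nil => rfl
    | cons b r => simpa [pvAppendLast] using ih

theorem pvIsNeg_tidak : pvIsNeg "tidak" = true := by decide

theorem pvBGo_neg_head (w : String) (rest : List String) (h : pvIsNeg w = true) :
    pvBGo (w :: rest) = pvBGo ("tidak" :: rest) := by
  cases rest <;> simp [pvBGo, h, pvIsNeg_tidak]

theorem pv_main (l : List String) :
    (∀ acc, (l.foldl pvAStep (acc, false)).1 = acc ++ pvBGo l) ∧
    (∀ acc, (l.foldl pvAStep (acc ++ ["tidak_"], true)).1 = acc ++ pvBGo ("tidak" :: l)) := by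
  induction l with
  | nil =>
    refine ⟨fun acc => by simp [pvBGo], fun acc => by simp [pvBGo, pvIsNeg_tidak]⟩
  | cons w rest ih =>
    constructor
    · intro acc
      by_cases h : pvIsNeg w = true
      · rw [pvBGo_neg_head w rest h]
        simpa [List.foldl, pvAStep, h] using ih.2 acc
      · rw [show (List.foldl pvAStep (acc, false) (w :: rest)) =
              List.foldl pvAStep (acc ++ [w], false) rest by
            simp [List.foldl, pvAStep, h]]
        rw [ih.1 (acc ++ [w])]
        cases rest <;> simp [pvBGo, h]
    · intro acc
      by_cases h : pvIsNeg w = true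
      · rw [show (List.foldl pvAStep (acc ++ ["tidak_"], true) (w :: rest)) =
              List.foldl pvAStep ((acc ++ ["tidak_"]) ++ ["tidak_"], true) rest by
            simp [List.foldl, pvAStep, h]]
        rw [ih.2 (acc ++ ["tidak_"])]
        simp [pvBGo, pvIsNeg_tidak, h, pvBGo_neg_head w rest h]
      · rw [show (List.foldl pvAStep (acc ++ ["tidak_"], true) (w :: rest)) =
              List.foldl pvAStep (pvAppendLast (acc ++ ["tidak_"]) w, false) rest by
            simp [List.foldl, pvAStep, h]]
        rw [pvAppendLast_snoc, ih.1 (acc ++ ["tidak_" ++ w])]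
        simp [pvBGo, pvIsNeg_tidak, h]

-- ===== VERDICT (by name: the statement is the Claim_ definition above) =====
theorem handle_negation_spec : Claim_equal_handle_negation := by
  intro l _
  unfold Spec_handle_negation handle_negation handle_negation_alt
  simpa using (pv_main l).1 []
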